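-- pv_equiv track=rewrite | github.com/alilego/votez-activity-analyzer | scripts/crawl_deputy_activity.py | _case_chaos_in_word
-- ===== SOURCE A (Python) =====
-- def _case_chaos_in_word(tok: str) -> bool:
--     """Handwritten OCR often alternates random case within a single token."""
--     letters = [c for c in tok if c.isalpha()]
--     if len(letters) < 5:
--         return False
--     flips = sum(
--         1
--         for i in range(len(letters) - 1)
--         if letters[i].islower() != letters[i + 1].islower()
--     )
--     return flips >= 5
-- ===== SOURCE B (Python) =====
-- def _case_chaos_in_word(tok: str) -> bool:
--     """Encode the case pattern of the letters as a bitmask (lowercase = 1 bit),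
--     then flips = popcount(mask XOR mask>>1) restricted to the n-1 pair positions."""
--     mask = 0
--     n = 0
--     for c in tok:
--         if c.isalpha():
--             mask = (mask << 1) | c.islower()
--             n += 1
--     if n < 5:
--         return False
--     return ((mask ^ (mask >> 1)) & ((1 << (n - 1)) - 1)).bit_count() >= 5
-- ===== Notes on version B (the rewrite author's own statement) =====
-- stated objective: alternative
-- what changed: B replaces A's letters-list + indexed adjacent-pair scan by a single accumulating pass that packs the letters' case pattern into an integer bitmask and decides chaos arithmetically as popcount((mask ^ mask>>1) masked to the n-1 pair positions) >= 5.
import Mathlib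
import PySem

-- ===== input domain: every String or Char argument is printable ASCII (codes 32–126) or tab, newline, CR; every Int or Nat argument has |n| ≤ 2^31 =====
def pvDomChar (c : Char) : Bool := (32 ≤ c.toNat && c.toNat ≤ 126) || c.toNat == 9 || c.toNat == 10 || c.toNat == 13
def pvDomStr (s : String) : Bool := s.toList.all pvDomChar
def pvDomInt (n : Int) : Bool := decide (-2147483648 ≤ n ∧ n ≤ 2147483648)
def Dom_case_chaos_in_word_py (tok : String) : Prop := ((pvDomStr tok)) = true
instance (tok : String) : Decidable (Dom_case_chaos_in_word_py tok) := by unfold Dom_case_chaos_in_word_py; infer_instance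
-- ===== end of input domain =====

-- B encodes the letters' case pattern as a bitmask built in one accumulating pass and
-- decides chaos by popcount(mask XOR mask>>1) on the pair positions, instead of A's
-- indexed adjacent-pair scan over a letters list; objective: alternative, same cost.

-- ===== PORT A =====
-- letters = [c for c in tok if c.isalpha()]; flips = sum(1 for i … if letters[i].islower() != letters[i+1].islower()); flips >= 5
def case_chaos_in_word_py (tok : String) : Bool :=
  let letters := tok.toList.filter (fun c => PySem.Chars.isalpha c)
  if letters.length < 5 then false
  else
    let flips : Int :=
      (PySem.List.pyRange 0 ((letters.length : Int) - 1) 1).foldl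
        (fun acc i =>
          if PySem.Chars.islower (PySem.List.pyGetD letters i ' ')
               != PySem.Chars.islower (PySem.List.pyGetD letters (i + 1) ' ')
          then acc + 1 else acc) 0
    flips ≥ 5

-- ===== PORT B =====
-- int.bit_count(): number of 1 bits, by repeated halving (exact for Nat)
def pvBitCount (m : Nat) : Nat :=
  if m = 0 then 0 else m % 2 + pvBitCount (m / 2)
decreasing_by exact Nat.div_lt_self (Nat.pos_of_ne_zero (by assumption)) (by omega)

-- mask = (mask << 1) | c.islower(); n += 1 — one pass over tok, then the popcount test
def case_chaos_in_word_py_alt (tok : String) : Bool :=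
  let st := tok.toList.foldl
    (fun (p : Nat × Nat) c =>
      if PySem.Chars.isalpha c then
        ((p.1 <<< 1) ||| (if PySem.Chars.islower c then 1 else 0), p.2 + 1)
      else p) (0, 0)
  if st.2 < 5 then false
  else pvBitCount ((st.1 ^^^ (st.1 >>> 1)) &&& ((1 <<< (st.2 - 1)) - 1)) ≥ 5

-- ===== PRECONDITION & SPEC =====
def Spec_case_chaos_in_word_py (tok : String) (out : Bool) : Prop := out = case_chaos_in_word_py_alt tok
instance (tok : String) (out : Bool) : Decidable (Spec_case_chaos_in_word_py tok out) := by unfold Spec_case_chaos_in_word_py; infer_instance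

-- ===== CLAIM (what is proved, stated in full; the proofs are below) =====
def Claim_equal_case_chaos_in_word_py : Prop := ∀ (tok : String), Dom_case_chaos_in_word_py tok → Spec_case_chaos_in_word_py tok (case_chaos_in_word_py tok)

-- ===== LEMMAS AND PROOFS =====

-- the case bit of a letter
def pvBit (c : Char) : Nat := if PySem.Chars.islower c then 1 else 0

-- the mask B accumulates over a letter list
def pvMask (l : List Char) : Nat := l.foldl (fun m c => 2 * m + pvBit c) 0

-- reference flip count: structural recursion on adjacent pairs
def pvFlips : List Char → Nat
  | a :: b :: t => (if PySem.Chars.islower a != PySem.Chars.islower b then 1 else 0) + pvFlips (b :: t)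
  | _ => 0

theorem pvBit_lt_two (c : Char) : pvBit c < 2 := by unfold pvBit; split <;> omega



-- (m <<< 1) ||| e = 2*m + e for e < 2
theorem pv_shift_or (m e : Nat) (he : e < 2) : (m <<< 1) ||| e = 2 * m + e := by
  apply Nat.eq_of_testBit_eq
  intro i
  cases i with
  | zero =>
    rw [Nat.testBit_or]
    simp only [Nat.testBit_zero, Nat.shiftLeft_eq, pow_one]
    have h1 : m * 2 % 2 = 0 := by omega
    have h2 : (2 * m + e) % 2 = e := by omega
    rw [h1, h2]
    rcases (by omega : e = 0 ∨ e = 1) with rfl | rfl <;> simp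
  | succ j =>
    rw [Nat.testBit_or]
    simp only [Nat.testBit_succ, Nat.shiftLeft_eq, pow_one]
    have h1 : m * 2 / 2 = m := by omega
    have h2 : (2 * m + e) / 2 = m := by omega
    have h3 : e / 2 = 0 := by omega
    rw [h1, h2, h3]
    simp

-- (2*M + e) ^^^ M = 2*(M ^^^ M/2) + (e ^^^ M % 2) for e < 2
theorem pv_xor_step (M e : Nat) (he : e < 2) :
    (2 * M + e) ^^^ M = 2 * (M ^^^ M / 2) + (e ^^^ M % 2) := by
  have hm2 : M % 2 = 0 ∨ M % 2 = 1 := by omega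
  have hd : (e ^^^ M % 2) < 2 := by
    rcases (by omega : e = 0 ∨ e = 1) with rfl | rfl <;> rcases hm2 with h | h <;>
      rw [h] <;> decide
  apply Nat.eq_of_testBit_eq
  intro i
  cases i with
  | zero =>
    rw [Nat.testBit_xor]
    simp only [Nat.testBit_zero]
    have h1 : (2 * M + e) % 2 = e := by omega
    have h2 : (2 * (M ^^^ M / 2) + (e ^^^ M % 2)) % 2 = (e ^^^ M % 2) := by omega
    rw [h1, h2]
    rcases (by omega : e = 0 ∨ e = 1) with rfl | rfl <;> rcases hm2 with h | h <;>
      rw [h] <;> simp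
  | succ j =>
    rw [Nat.testBit_xor]
    simp only [Nat.testBit_succ]
    have h1 : (2 * M + e) / 2 = M := by omega
    have h2 : (2 * (M ^^^ M / 2) + (e ^^^ M % 2)) / 2 = (M ^^^ M / 2) := by omega
    rw [h1, h2, Nat.testBit_xor]

-- (2*x + d) % 2^(k+1) = 2*(x % 2^k) + d for d < 2
theorem pv_mod_step (x d k : Nat) (hd : d < 2) :
    (2 * x + d) % 2 ^ (k + 1) = 2 * (x % 2 ^ k) + d := by
  have hp : 0 < 2 ^ k := Nat.two_pow_pos k
  obtain ⟨q, r, hr, rfl⟩ : ∃ q r, r < 2 ^ k ∧ x = 2 ^ k * q + r :=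
    ⟨x / 2 ^ k, x % 2 ^ k, Nat.mod_lt _ hp, by rw [Nat.div_add_mod]⟩
  have hmod : (2 ^ k * q + r) % 2 ^ k = r := by
    rw [Nat.mul_add_mod, Nat.mod_eq_of_lt hr]
  rw [hmod]
  have hsplit : 2 * (2 ^ k * q + r) + d = (2 * r + d) + q * 2 ^ (k + 1) := by ring
  rw [hsplit, Nat.add_mul_mod_self_right, Nat.mod_eq_of_lt (by rw [pow_succ]; omega)]

-- popcount of a bit step
theorem pvBitCount_step (x d : Nat) (hd : d < 2) : pvBitCount (2 * x + d) = pvBitCount x + d := by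
  by_cases h0 : 2 * x + d = 0
  · have hx : x = 0 := by omega
    have hdd : d = 0 := by omega
    simp [hx, hdd, pvBitCount]
  · rw [pvBitCount, if_neg h0]
    have h1 : (2 * x + d) % 2 = d := by omega
    have h2 : (2 * x + d) / 2 = x := by omega
    rw [h1, h2]
    omega

-- mask of an appended letter
theorem pvMask_append (l : List Char) (c : Char) : pvMask (l ++ [c]) = 2 * pvMask l + pvBit c := by
  simp [pvMask, List.foldl_append]

-- low bit of the mask is the last letter's case bit
theorem pvMask_mod_two (l : List Char) (c : Char) : pvMask (l ++ [c]) % 2 = pvBit c := by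
  rw [pvMask_append]
  have := pvBit_lt_two c
  omega

-- flips of an appended letter
theorem pvFlips_append (l : List Char) (c : Char) (h : l ≠ []) :
    pvFlips (l ++ [c]) = pvFlips l +
      (if PySem.Chars.islower (l.getLastD ' ') != PySem.Chars.islower c then 1 else 0) := by
  induction l with
  | nil => simp at h
  | cons a t ih =>
    cases t with
    | nil => simp [pvFlips]
    | cons b t' =>
      have := ih (by simp)
      simp only [List.cons_append, pvFlips] at this ⊢
      rw [this]
      simp [List.getLastD]
      omega

-- the masked-xor popcount computes the flip count
theorem pv_popcount_flips (l : List Char) (h : l ≠ []) :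
    pvBitCount ((pvMask l ^^^ pvMask l / 2) % 2 ^ (l.length - 1)) = pvFlips l := by
  induction l using List.reverseRecOn with
  | nil => simp at h
  | append_singleton l c ih =>
    by_cases hne : l = []
    · subst hne
      have h0 : pvBitCount 0 = 0 := by rw [pvBitCount]; simp
      simp [pvMask, pvFlips, pvBit, Nat.mod_one, h0]
    · rw [pvMask_append]
      have he := pvBit_lt_two c
      have hdiv : (2 * pvMask l + pvBit c) / 2 = pvMask l := by omega
      rw [hdiv, pv_xor_step _ _ he]
      have hlpos : l.length ≠ 0 := by
        intro h0; exact hne (List.eq_nil_of_length_eq_zero h0)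
      have hlen : (l ++ [c]).length - 1 = (l.length - 1) + 1 := by
        simp; omega
      rw [hlen]
      have hd : (pvBit c ^^^ pvMask l % 2) < 2 := by
        have hm : pvMask l % 2 = 0 ∨ pvMask l % 2 = 1 := by omega
        rcases (by unfold pvBit; split <;> omega : pvBit c = 0 ∨ pvBit c = 1) with h1 | h1 <;>
          rcases hm with h2 | h2 <;> rw [h1, h2] <;> decide
      rw [pv_mod_step _ _ _ hd, pvBitCount_step _ _ hd, ih hne, pvFlips_append _ _ hne]
      congr 1
      -- the xored low bit is the flip indicator of the last pair
      obtain ⟨l', c', rfl⟩ : ∃ l' c', l = l' ++ [c'] := by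
        rcases List.eq_nil_or_concat l with rfl | ⟨l', c', rfl⟩
        · simp at hne
        · exact ⟨l', c', by simp⟩
      rw [pvMask_mod_two]
      have hg : (l' ++ [c']).getLastD ' ' = c' := by simp
      rw [hg]
      unfold pvBit
      by_cases h1 : PySem.Chars.islower c <;> by_cases h2 : PySem.Chars.islower c' <;>
        simp [h1, h2]

-- B's fold over tok computes (pvMask letters, letters.length)
theorem pv_fold_state (l : List Char) (m n : Nat) :
    l.foldl
      (fun (p : Nat × Nat) c =>
        if PySem.Chars.isalpha c then
          ((p.1 <<< 1) ||| (if PySem.Chars.islower c then 1 else 0), p.2 + 1)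
        else p) (m, n)
    = ((l.filter (fun c => PySem.Chars.isalpha c)).foldl (fun m c => 2 * m + pvBit c) m,
       n + (l.filter (fun c => PySem.Chars.isalpha c)).length) := by
  induction l generalizing m n with
  | nil => simp
  | cons c t ih =>
    by_cases hc : PySem.Chars.isalpha c
    · simp only [List.foldl_cons, List.filter_cons, hc]
      rw [pv_shift_or _ _ (by unfold pvBit at *; split <;> omega)]
      rw [ih]
      simp [pvBit]
      omega
    · simp [List.foldl_cons, hc, ih]

-- A's index-based adjacent count over range equals pvFlips
theorem adj_range_eq_flips (l : List Char) :
    (List.range (l.length - 1)).countP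
      (fun k => PySem.Chars.islower (l.getD k ' ') != PySem.Chars.islower (l.getD (k+1) ' '))
    = pvFlips l := by
  induction l with
  | nil => simp [pvFlips]
  | cons a t ih =>
    cases t with
    | nil => simp [pvFlips]
    | cons b t' =>
      rw [show (a :: b :: t').length - 1 = t'.length + 1 by simp,
          List.range_succ_eq_map, List.countP_cons, List.countP_map]
      rw [show (b :: t').length - 1 = t'.length by simp] at ih
      rw [show List.countP
            ((fun k => PySem.Chars.islower ((a :: b :: t').getD k ' ')
              != PySem.Chars.islower ((a :: b :: t').getD (k+1) ' ')) ∘ Nat.succ)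
            (List.range t'.length)
          = List.countP
            (fun k => PySem.Chars.islower ((b :: t').getD k ' ')
              != PySem.Chars.islower ((b :: t').getD (k+1) ' ')) (List.range t'.length) from
          List.countP_congr (fun x _ => by simp), ih]
      simp only [pvFlips]
      by_cases hab : PySem.Chars.islower a = PySem.Chars.islower b <;> simp [hab] <;> omega

-- A's range fold equals pvFlips as an Int
theorem flips_fold_eq (l : List Char) :
    (PySem.List.pyRange 0 ((l.length : Int) - 1) 1).foldl
      (fun acc i =>
        if PySem.Chars.islower (PySem.List.pyGetD l i ' ')
             != PySem.Chars.islower (PySem.List.pyGetD l (i + 1) ' ')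
        then acc + 1 else acc) (0 : Int)
    = (pvFlips l : Int) := by
  rw [PySem.List.foldl_if_add_one, zero_add, PySem.List.pyRange_one, List.countP_map]
  rw [show ((l.length : Int) - 1 - 0).toNat = l.length - 1 by omega]
  rw [show List.countP
        ((fun i => PySem.Chars.islower (PySem.List.pyGetD l i ' ')
          != PySem.Chars.islower (PySem.List.pyGetD l (i + 1) ' ')) ∘ (fun k : Nat => (0 : Int) + k))
        (List.range (l.length - 1))
      = List.countP
        (fun k => PySem.Chars.islower (l.getD k ' ')
          != PySem.Chars.islower (l.getD (k+1) ' ')) (List.range (l.length - 1)) from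
      List.countP_congr (fun x _ => by
        simp only [Function.comp, zero_add,
          show ((x : Int) + 1) = ((x + 1 : Nat) : Int) by push_cast; ring,
          PySem.List.pyGetD_natCast])]
  rw [adj_range_eq_flips]

-- ===== VERDICT (by name: the statement is the Claim_ definition above) =====
theorem case_chaos_in_word_py_spec : Claim_equal_case_chaos_in_word_py := by
  intro tok _
  unfold Spec_case_chaos_in_word_py case_chaos_in_word_py case_chaos_in_word_py_alt
  rw [pv_fold_state]
  set letters := tok.toList.filter (fun c => PySem.Chars.isalpha c) with hl
  by_cases h5 : letters.length < 5
  · simp [h5]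
  · simp only [zero_add, h5, if_false, flips_fold_eq]
    have hne : letters ≠ [] := by
      intro h; rw [h] at h5; simp at h5
    have hpc := pv_popcount_flips letters hne
    have hshift : (1 : Nat) <<< (letters.length - 1) = 2 ^ (letters.length - 1) := by
      simp [Nat.shiftLeft_eq]
    have hand : (pvMask letters ^^^ pvMask letters >>> 1) &&& ((1 <<< (letters.length - 1)) - 1)
        = (pvMask letters ^^^ pvMask letters / 2) % 2 ^ (letters.length - 1) := by
      rw [hshift, Nat.and_two_pow_sub_one_eq_mod, Nat.shiftRight_succ, Nat.shiftRight_zero]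
    rw [show pvMask letters = letters.foldl (fun m c => 2 * m + pvBit c) 0 from rfl] at hand hpc
    rw [hand, hpc]
    simp only [ge_iff_le, decide_eq_decide]
    omega
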